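-- pv_equiv track=rewrite | github.com/aidardarmesh/leetcode3 | 0777. Swap Adjacent in LR String.py | can_transform
-- ===== SOURCE A (Python) =====
-- def can_transform(start, end):
--     i, j = 0, 0
--     n, m = len(start), len(end)
--
--     while i < n and j < m:
--         while i < n and start[i] == 'X':
--             i += 1
--         while j < m and end[j] == 'X':
--             j += 1
--
--         if (i == n) != (j == m):
--             return False
--
--         if i == n and j == m:
--             return True
--
--         if start[i] != end[j]:
--             return False
--
--         if start[i] == 'R' and i > j:
--             return False
--
--         if start[i] == 'L' and i < j:
--             return False
--
--         i += 1
--         j += 1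
--
--     while i < n and start[i] == 'X':
--         i += 1
--     while j < m and end[j] == 'X':
--         j += 1
--
--     return i == n and j == m
-- ===== SOURCE B (Python) =====
-- def can_transform(start, end):
--     a = [(i, c) for i, c in enumerate(start) if c != 'X']
--     b = [(i, c) for i, c in enumerate(end) if c != 'X']
--     if [c for _, c in a] != [c for _, c in b]:
--         return False
--     for (si, c), (ei, _) in zip(a, b):
--         if c == 'L' and si < ei:
--             return False
--         if c == 'R' and si > ei:
--             return False
--     return True
-- ===== Notes on version B (the rewrite author's own statement) =====
-- stated objective: simpler
-- what changed: Replaced the interleaved two-pointer skip-X-and-match loop by a build-then-check decomposition: one pass builds the (index, char) tables of non-'X' characters of each string, the char sequences are compared wholesale, and a single zip pass checks the L/R index directions.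
import Mathlib
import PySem

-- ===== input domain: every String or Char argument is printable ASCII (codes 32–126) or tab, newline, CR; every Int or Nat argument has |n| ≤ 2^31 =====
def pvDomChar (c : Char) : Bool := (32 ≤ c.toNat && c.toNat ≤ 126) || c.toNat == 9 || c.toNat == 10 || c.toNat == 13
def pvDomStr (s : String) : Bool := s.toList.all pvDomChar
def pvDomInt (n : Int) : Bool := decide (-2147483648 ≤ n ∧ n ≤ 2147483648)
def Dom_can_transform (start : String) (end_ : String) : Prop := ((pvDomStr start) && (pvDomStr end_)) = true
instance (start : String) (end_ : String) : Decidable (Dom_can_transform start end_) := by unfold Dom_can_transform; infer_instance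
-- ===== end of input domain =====

-- B replaces A's interleaved two-pointer skip-and-match loop by building (index, char)
-- tables of the non-'X' characters and checking them in two simple passes (simpler decomposition).

-- ===== PORT A =====
-- inner `while i < n and start[i] == 'X': i += 1`
def skipX (s : List Char) (n i : Nat) : Nat :=
  if i < n ∧ s.getD i ' ' = 'X' then skipX s n (i + 1) else i
termination_by n - i
decreasing_by omega

-- the outer while loop of A, together with the trailing skip loops and final check
def loopA (s e : List Char) (n m i j : Nat) : Bool :=
  if h : i < n ∧ j < m then
    let i' := skipX s n i
    let j' := skipX e m j
    if h1 : (decide (i' = n)) ≠ (decide (j' = m)) then false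
    else if h2 : i' = n ∧ j' = m then true
    else if s.getD i' ' ' ≠ e.getD j' ' ' then false
    else if s.getD i' ' ' = 'R' ∧ i' > j' then false
    else if s.getD i' ' ' = 'L' ∧ i' < j' then false
    else loopA s e n m (i' + 1) (j' + 1)
  else
    (skipX s n i == n) && (skipX e m j == m)
termination_by (n - i) + (m - j)
decreasing_by
  have hge : ∀ (l : List Char) (N k : Nat), k ≤ skipX l N k := by
    intro l N k
    induction k using skipX.induct l N with
    | case1 k hc ih => rw [skipX, if_pos hc]; omega
    | case2 k hc => rw [skipX, if_neg hc]
  have hi := hge s n i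
  have hj := hge e m j
  simp only [ne_eq, not_iff, not_not, decide_eq_decide] at h1
  have : ¬ (skipX s n i = n) := by
    intro hn; exact h2 ⟨hn, h1.mp hn⟩
  have : ¬ (skipX e m j = m) := by
    intro hm; exact h2 ⟨h1.mpr hm, hm⟩
  omega

def can_transform (start : String) (end_ : String) : Bool :=
  loopA start.toList end_.toList start.toList.length end_.toList.length 0 0

-- ===== PORT B =====
def can_transform_alt (start : String) (end_ : String) : Bool :=
  let a := (PySem.List.enumerate start.toList 0).filter (fun p => p.2 != 'X')
  let b := (PySem.List.enumerate end_.toList 0).filter (fun p => p.2 != 'X')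
  if a.map Prod.snd ≠ b.map Prod.snd then false
  else (a.zip b).all (fun pq =>
    !(pq.1.2 == 'L' && decide (pq.1.1 < pq.2.1)) && !(pq.1.2 == 'R' && decide (pq.1.1 > pq.2.1)))

-- ===== PRECONDITION & SPEC =====
def Spec_can_transform (start : String) (end_ : String) (out : Bool) : Prop := out = can_transform_alt start end_
instance (start : String) (end_ : String) (out : Bool) : Decidable (Spec_can_transform start end_ out) := by unfold Spec_can_transform; infer_instance

-- ===== CLAIM (what is proved, stated in full; the proofs are below) =====
def Claim_equal_can_transform : Prop := ∀ (start : String) (end_ : String), Dom_can_transform start end_ → Spec_can_transform start end_ (can_transform start end_)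

-- ===== LEMMAS AND PROOFS =====

lemma skipX_ge (s : List Char) (n i : Nat) : i ≤ skipX s n i := by
  induction i using skipX.induct s n with
  | case1 i h ih => rw [skipX, if_pos h]; omega
  | case2 i h => rw [skipX, if_neg h]

lemma skipX_le (s : List Char) (n i : Nat) (h : i ≤ n) : skipX s n i ≤ n := by
  induction i using skipX.induct s n with
  | case1 i hc ih => rw [skipX, if_pos hc]; exact ih (by omega)
  | case2 i hc => rw [skipX, if_neg hc]; exact h

lemma skipX_stop (s : List Char) (n i : Nat) (h : skipX s n i < n) :
    s.getD (skipX s n i) ' ' ≠ 'X' := by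
  induction i using skipX.induct s n with
  | case1 i hc ih => rw [skipX, if_pos hc] at h ⊢; exact ih h
  | case2 i hc => rw [skipX, if_neg hc] at h ⊢; intro hx; exact hc ⟨h, hx⟩


-- the non-'X' (index, char) entries of l, indices starting at b
def restL (l : List Char) (b : Int) : List (Int × Char) :=
  (PySem.List.enumerate l b).filter (fun p => p.2 != 'X')

-- the non-'X' entries of s at absolute indices ≥ i
def rest (s : List Char) (i : Nat) : List (Int × Char) := restL (s.drop i) i

-- common recursive specification both ports reduce to
def matchPairs : List (Int × Char) → List (Int × Char) → Bool
  | [], [] => true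
  | [], _ :: _ => false
  | _ :: _, [] => false
  | (i, c) :: a, (j, d) :: b =>
    if c ≠ d then false
    else if c = 'R' ∧ i > j then false
    else if c = 'L' ∧ i < j then false
    else matchPairs a b

lemma restL_nil (b : Int) : restL [] b = [] := by simp [restL, PySem.List.enumerate]

lemma restL_cons_X (l : List Char) (b : Int) : restL ('X' :: l) b = restL l (b + 1) := by
  simp [restL, PySem.List.enumerate_cons]

lemma restL_cons (c : Char) (l : List Char) (b : Int) (h : c ≠ 'X') :
    restL (c :: l) b = (b, c) :: restL l (b + 1) := by
  simp [restL, PySem.List.enumerate_cons, h]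

lemma rest_of_ge (s : List Char) (i : Nat) (h : s.length ≤ i) : rest s i = [] := by
  rw [rest, List.drop_eq_nil_of_le h, restL_nil]

lemma rest_succ_of_X (s : List Char) (i : Nat) (hi : i < s.length)
    (hX : s.getD i ' ' = 'X') : rest s i = rest s (i + 1) := by
  rw [rest, List.drop_eq_getElem_cons hi, List.getD_eq_getElem s ' ' hi] at *
  rw [hX, restL_cons_X]
  simp [rest]

lemma rest_cons (s : List Char) (i : Nat) (hi : i < s.length)
    (hX : s.getD i ' ' ≠ 'X') : rest s i = ((i : Int), s.getD i ' ') :: rest s (i + 1) := by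
  rw [List.getD_eq_getElem s ' ' hi] at *
  rw [rest, List.drop_eq_getElem_cons hi, restL_cons _ _ _ hX]
  simp [rest]

lemma rest_skipX (s : List Char) (n i : Nat) (hn : n = s.length) :
    rest s (skipX s n i) = rest s i := by
  induction i using skipX.induct s n with
  | case1 i hc ih =>
      rw [skipX, if_pos hc, ih, rest_succ_of_X s i (by omega) hc.2]
  | case2 i hc => rw [skipX, if_neg hc]

-- A's loop computes matchPairs of the two rest lists
lemma loopA_eq (s e : List Char) {n m : Nat} (hn : n = s.length) (hm : m = e.length)
    (N i j : Nat) (hN : (n - i) + (m - j) ≤ N)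
    (hi : i ≤ n) (hj : j ≤ m) :
    loopA s e n m i j = matchPairs (rest s i) (rest e j) := by
  induction N generalizing i j with
  | zero =>
      have hi' : i = n := by omega
      have hj' : j = m := by omega
      subst hi' hj'
      rw [loopA, dif_neg (by omega)]
      rw [skipX, if_neg (by omega), skipX, if_neg (by omega)]
      rw [rest_of_ge s _ (by omega), rest_of_ge e _ (by omega)]
      simp [matchPairs]
  | succ N ih =>
      by_cases h : i < n ∧ j < m
      · rw [loopA, dif_pos h]
        have hgi := skipX_ge s n i
        have hgj := skipX_ge e m j
        have hli := skipX_le s n i (by omega)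
        have hlj := skipX_le e m j (by omega)
        rw [← rest_skipX s n i hn, ← rest_skipX e m j hm]
        set i' := skipX s n i with hi'def
        set j' := skipX e m j with hj'def
        simp only []
        by_cases h1 : (decide (i' = n)) ≠ (decide (j' = m))
        · rw [dif_pos h1]
          rw [ne_eq, decide_eq_decide] at h1
          by_cases hin : i' = n
          · have hjm : j' < m := by
              rcases Nat.lt_or_ge j' m with h' | h'
              · exact h'
              · exact absurd (Iff.intro (fun _ => by omega) (fun _ => hin)) h1
            rw [rest_of_ge s _ (by omega), rest_cons e j' (by omega) (skipX_stop e m j hjm)]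
            simp [matchPairs]
          · have hin' : i' < n := by omega
            have hjm : j' = m := by
              rcases Nat.lt_or_ge j' m with h' | h'
              · exact absurd (Iff.intro (fun hh => absurd hh hin) (fun hh => by omega)) h1
              · omega
            rw [rest_of_ge e _ (by omega), rest_cons s i' (by omega) (skipX_stop s n i hin')]
            simp [matchPairs]
        · rw [dif_neg h1]
          rw [ne_eq, not_not, decide_eq_decide] at h1
          by_cases h2 : i' = n ∧ j' = m
          · rw [dif_pos h2]
            rw [rest_of_ge s _ (by omega), rest_of_ge e _ (by omega)]
            simp [matchPairs]
          · rw [dif_neg h2]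
            have hin : i' < n := by
              rcases Nat.lt_or_ge i' n with h' | h'
              · exact h'
              · exact absurd ⟨by omega, h1.mp (by omega)⟩ h2
            have hjm : j' < m := by
              rcases Nat.lt_or_ge j' m with h' | h'
              · exact h'
              · exact absurd ⟨h1.mpr (by omega), by omega⟩ h2
            rw [rest_cons s i' (by omega) (skipX_stop s n i hin),
                rest_cons e j' (by omega) (skipX_stop e m j hjm)]
            simp only [matchPairs, gt_iff_lt, Nat.cast_lt]
            split_ifs <;> try rfl
            exact ih (i' + 1) (j' + 1) (by omega) (by omega) (by omega)
      · rw [loopA, dif_neg h]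
        rcases Nat.lt_or_ge i n with hlt | hge
        · -- then j = m
          have hjm : j = m := by omega
          subst hjm
          rw [rest_of_ge e _ (by omega)]
          rw [show skipX e j j = j from by rw [skipX, if_neg (by omega)]]
          have hri : rest s (skipX s n i) = rest s i := rest_skipX s n i hn
          rcases Nat.lt_or_ge (skipX s n i) n with hsl | hsg
          · have hsx : s.getD (skipX s n i) ' ' ≠ 'X' := skipX_stop s n i hsl
            rw [← hri, rest_cons s _ (by omega) hsx]
            simp [matchPairs]
            omega
          · have : skipX s n i = n := by have := skipX_le s n i (by omega); omega
            rw [← hri, rest_of_ge s _ (by omega)]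
            simp [matchPairs, this]
        · have him : i = n := by omega
          subst him
          rw [rest_of_ge s _ (by omega)]
          rw [show skipX s i i = i from by rw [skipX, if_neg (by omega)]]
          have hrj : rest e (skipX e m j) = rest e j := rest_skipX e m j hm
          rcases Nat.lt_or_ge (skipX e m j) m with hsl | hsg
          · have hsx : e.getD (skipX e m j) ' ' ≠ 'X' := skipX_stop e m j hsl
            rw [← hrj, rest_cons e _ (by omega) hsx]
            simp [matchPairs]
            omega
          · have : skipX e m j = m := by have := skipX_le e m j (by omega); omega
            rw [← hrj, rest_of_ge e _ (by omega)]
            simp [matchPairs, this]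

-- matchPairs equals B's compare-then-zip check
lemma matchPairs_eq (a b : List (Int × Char)) :
    matchPairs a b =
      (if a.map Prod.snd ≠ b.map Prod.snd then false
       else (a.zip b).all (fun pq =>
         !(pq.1.2 == 'L' && decide (pq.1.1 < pq.2.1)) && !(pq.1.2 == 'R' && decide (pq.1.1 > pq.2.1)))) := by
  induction a generalizing b with
  | nil =>
      cases b with
      | nil => simp [matchPairs]
      | cons y ys => simp [matchPairs]
  | cons x xs ih =>
      cases b with
      | nil => obtain ⟨i, c⟩ := x; simp [matchPairs]
      | cons y ys =>
        obtain ⟨i, c⟩ := x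
        obtain ⟨j, d⟩ := y
        by_cases hcd : c = d
        · subst hcd
          have mp : matchPairs ((i, c) :: xs) ((j, c) :: ys) =
              (if c = 'R' ∧ i > j then false
               else if c = 'L' ∧ i < j then false
               else matchPairs xs ys) := by simp [matchPairs]
          rw [mp, ih ys]
          by_cases hmap : xs.map Prod.snd = ys.map Prod.snd
          · have hc1 : ¬(List.map Prod.snd xs ≠ List.map Prod.snd ys) := by simp [hmap]
            have hc2 : ¬(List.map Prod.snd ((i, c) :: xs) ≠ List.map Prod.snd ((j, c) :: ys)) := by
              simp [hmap]
            rw [if_neg hc1, if_neg hc2]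
            rw [List.zip_cons_cons, List.all_cons]
            by_cases hR : c = 'R' ∧ i > j
            · have hR' : (c == 'R' && decide (i > j)) = true := by
                simp [hR.1]; exact hR.2
              simp [hR]
            · have hR' : (c == 'R' && decide (i > j)) = false := by
                by_cases hc : c = 'R'
                · simp [hc, decide_eq_false_iff_not]
                  exact not_lt.mp (fun hij => hR ⟨hc, hij⟩)
                · simp [hc]
              by_cases hL : c = 'L' ∧ i < j
              · have hL' : (c == 'L' && decide (i < j)) = true := by
                  simp [hL.1]; exact hL.2
                simp [hL]
              · have hL' : (c == 'L' && decide (i < j)) = false := by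
                  by_cases hc : c = 'L'
                  · simp [hc, decide_eq_false_iff_not]
                    exact not_lt.mp (fun hij => hL ⟨hc, hij⟩)
                  · simp [hc]
                simp [if_neg hR, if_neg hL, hR', hL']
          · have hc1 : List.map Prod.snd xs ≠ List.map Prod.snd ys := hmap
            have hc2 : List.map Prod.snd ((i, c) :: xs) ≠ List.map Prod.snd ((j, c) :: ys) := by
              simp [hmap]
            rw [if_pos hc1, if_pos hc2]
            split_ifs <;> rfl
        · have hne : (c :: xs.map Prod.snd) ≠ (d :: ys.map Prod.snd) := by simp [hcd]
          simp [matchPairs, hcd, hne]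

-- ===== VERDICT (by name: the statement is the Claim_ definition above) =====
theorem can_transform_spec : Claim_equal_can_transform := by
  intro start end_ _
  unfold Spec_can_transform can_transform can_transform_alt
  rw [loopA_eq start.toList end_.toList rfl rfl (start.toList.length + end_.toList.length) 0 0 (by omega) (by omega) (by omega)]
  rw [matchPairs_eq]
  simp [rest, restL]
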